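-- pv_equiv track=rewrite | github.com/SimonaGug/LAML | pddl_learning_noise.py | get_type_hierarchy
-- ===== SOURCE A (Python) =====
-- from collections import defaultdict
--
-- def get_type_hierarchy(type_dict):
--     # Group child types by their parent type
--     hierarchy = defaultdict(list)
--     for child, parent in type_dict.items():
--         hierarchy[parent].append(child)
--
--     # Build the formatted string
--     sorted_parents = sorted(hierarchy.keys())
--     result = []
--     for parent in sorted_parents:
--         children = sorted(hierarchy[parent])
--         if parent == "object":
--             # For the top-level parent "object"
--             result.append(f"    {' '.join(children)} - {parent}")
--         else:
--             result.append(f"    {' '.join(children)} - {parent}")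
--
--     return f"  (:types\n{result[0]}\n" + "\n".join(result[1:]) +   ") \n"
-- ===== SOURCE B (Python) =====
-- def get_type_hierarchy(type_dict):
--     # One global sort by (parent, child), then a single linear scan that cuts
--     # the sorted pairs into consecutive same-parent groups.
--     pairs = sorted(type_dict.items(), key=lambda kv: (kv[1], kv[0]))
--     lines = []
--     i, n = 0, len(pairs)
--     while i < n:
--         parent = pairs[i][1]
--         j = i + 1
--         while j < n and pairs[j][1] == parent:
--             j += 1
--         children = " ".join(child for child, _ in pairs[i:j])
--         lines.append(f"    {children} - {parent}")
--         i = j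
--     return f"  (:types\n{lines[0]}\n" + "\n".join(lines[1:]) + ") \n"
-- ===== Notes on version B (the rewrite author's own statement) =====
-- stated objective: idiomatic
-- what changed: Replaces A's defaultdict grouping followed by sorting the parents and re-sorting each parent's child list with one global sort of the items by (parent, child) and a single linear scan that cuts consecutive same-parent runs into lines; A's redundant object/else branch is collapsed.
import Mathlib
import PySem

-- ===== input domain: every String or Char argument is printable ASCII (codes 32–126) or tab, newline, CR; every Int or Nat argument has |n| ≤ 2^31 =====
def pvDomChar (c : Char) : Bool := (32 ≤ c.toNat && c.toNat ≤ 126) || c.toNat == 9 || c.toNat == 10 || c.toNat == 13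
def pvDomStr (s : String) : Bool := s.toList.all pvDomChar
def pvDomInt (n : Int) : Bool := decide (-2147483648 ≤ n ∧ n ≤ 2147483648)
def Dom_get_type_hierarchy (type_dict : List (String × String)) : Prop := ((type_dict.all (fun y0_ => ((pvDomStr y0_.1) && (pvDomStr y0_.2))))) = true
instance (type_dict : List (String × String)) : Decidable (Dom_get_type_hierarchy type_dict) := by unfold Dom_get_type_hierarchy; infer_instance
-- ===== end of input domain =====

-- B replaces A's dict-grouping plus a per-parent sort by one global sort of the items
-- by (parent, child) followed by a single linear scan over consecutive same-parent runs
-- (objective: idiomatic; no speed claim).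

-- ===== PORT A =====
def get_type_hierarchy (type_dict : List (String × String)) : String :=
  -- hierarchy = defaultdict(list); for child, parent in type_dict.items(): hierarchy[parent].append(child)
  let hierarchy : PySem.Dict String (List String) :=
    type_dict.foldl (fun d cp => d.modify cp.2 [] (fun l => l ++ [cp.1])) PySem.Dict.empty
  let sorted_parents := PySem.List.sorted hierarchy.keys (fun x => x) false
  -- A's if/else has two identical branches; both are transliterated
  let result : List String :=
    sorted_parents.foldl (fun acc parent =>
      if parent == "object" then
        acc ++ ["    " ++ PySem.Str.join " " (PySem.List.sorted (hierarchy.getD parent []) (fun x => x) false) ++ " - " ++ parent]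
      else
        acc ++ ["    " ++ PySem.Str.join " " (PySem.List.sorted (hierarchy.getD parent []) (fun x => x) false) ++ " - " ++ parent]) []
  -- result[0] raises IndexError on an empty dict: excluded by Pre_
  "  (:types\n" ++ PySem.List.pyGetD result 0 "" ++ "\n" ++
    PySem.Str.join "\n" (PySem.List.slice result (some 1) none) ++ ") \n"

-- ===== PORT B =====
-- the linear scan of Source B (outer while i < n; inner while j advances over the same parent):
-- one step yields the head's group (head plus takeWhile) and continues on the rest (dropWhile)
def pvGroups : List (String × String) → List (String × List String)
  | [] => []
  | (c, p) :: t =>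
    (p, c :: (t.takeWhile (fun x => x.2 == p)).map (fun x => x.1)) ::
      pvGroups (t.dropWhile (fun x => x.2 == p))
termination_by xs => xs.length
decreasing_by
  have := List.length_dropWhile_le (fun x => x.2 == p) t
  simp only [List.length_cons]; omega

def get_type_hierarchy_alt (type_dict : List (String × String)) : String :=
  let pairs := PySem.List.sorted2 type_dict (fun kv => kv.2) (fun kv => kv.1) false
  let lines : List String :=
    (pvGroups pairs).map (fun g => "    " ++ PySem.Str.join " " g.2 ++ " - " ++ g.1)
  "  (:types\n" ++ PySem.List.pyGetD lines 0 "" ++ "\n" ++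
    PySem.Str.join "\n" (PySem.List.slice lines (some 1) none) ++ ") \n"

-- ===== PRECONDITION & SPEC =====
-- Pre_ excludes the empty dict, on which A raises IndexError (result[0]), and association
-- lists with a duplicated child key, which do not represent a Python dict (A's parameter is a dict).
def Pre_get_type_hierarchy (type_dict : List (String × String)) : Prop :=
  type_dict ≠ [] ∧ (type_dict.map (fun x => x.1)).Nodup
instance (type_dict : List (String × String)) : Decidable (Pre_get_type_hierarchy type_dict) := by
  unfold Pre_get_type_hierarchy; infer_instance

def pvWitness_get_type_hierarchy : (List (String × String)) := [("car", "object"), ("truck", "vehicle")]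

def Spec_get_type_hierarchy (type_dict : List (String × String)) (out : String) : Prop := out = get_type_hierarchy_alt type_dict
instance (type_dict : List (String × String)) (out : String) : Decidable (Spec_get_type_hierarchy type_dict out) := by unfold Spec_get_type_hierarchy; infer_instance

-- ===== CLAIM (what is proved, stated in full; the proofs are below) =====
def Claim_equal_get_type_hierarchy : Prop := ∀ (type_dict : List (String × String)), Dom_get_type_hierarchy type_dict → Pre_get_type_hierarchy type_dict → Spec_get_type_hierarchy type_dict (get_type_hierarchy type_dict)

-- ===== LEMMAS AND PROOFS =====

-- the strict "(parent, child)" lexicographic comparison Source B sorts by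
def pvBefore (a b : String × String) : Bool :=
  decide (a.2 < b.2) || (!decide (b.2 < a.2) && decide (a.1 < b.1))

theorem pvBefore_iff (a b : String × String) :
    pvBefore a b = true ↔ a.2 < b.2 ∨ (a.2 = b.2 ∧ a.1 < b.1) := by
  simp only [pvBefore, Bool.or_eq_true, Bool.and_eq_true, Bool.not_eq_true', decide_eq_true_iff,
    decide_eq_false_iff_not]
  constructor
  · rintro (h | ⟨h1, h2⟩)
    · exact Or.inl h
    · rcases lt_trichotomy a.2 b.2 with h' | h' | h'
      · exact Or.inl h'
      · exact Or.inr ⟨h', h2⟩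
      · exact absurd h' h1
  · rintro (h | ⟨h1, h2⟩)
    · exact Or.inl h
    · exact Or.inr ⟨by rw [h1]; exact lt_irrefl _, h2⟩

theorem pvBefore_eq_false_iff (a b : String × String) :
    pvBefore a b = false ↔ ¬ (a.2 < b.2 ∨ (a.2 = b.2 ∧ a.1 < b.1)) := by
  rw [← pvBefore_iff]; cases pvBefore a b <;> simp

theorem pvBefore_asymm {a b : String × String} (h : pvBefore a b = true) : pvBefore b a = false := by
  rw [pvBefore_iff] at h
  rw [pvBefore_eq_false_iff]
  rintro (h' | ⟨h1, h2⟩) <;> rcases h with h'' | ⟨h3, h4⟩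
  · exact absurd (h'.trans h'') (lt_irrefl _)
  · rw [h3] at h'; exact absurd h' (lt_irrefl _)
  · rw [h1] at h''; exact absurd h'' (lt_irrefl _)
  · exact absurd (h2.trans h4) (lt_irrefl _)

theorem pvBefore_trans {a b c : String × String} (h1 : pvBefore a b = true)
    (h2 : pvBefore b c = true) : pvBefore a c = true := by
  rw [pvBefore_iff] at h1 h2 ⊢
  rcases h1 with h | ⟨e1, l1⟩ <;> rcases h2 with h' | ⟨e2, l2⟩
  · exact Or.inl (h.trans h')
  · exact Or.inl (e2 ▸ h)
  · exact Or.inl (e1 ▸ h')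
  · exact Or.inr ⟨e1.trans e2, l1.trans l2⟩

-- insertBy with pvBefore preserves "no later element strictly precedes an earlier one"
theorem pvInsertBy_pairwise (x : String × String) (ys : List (String × String))
    (h : ys.Pairwise (fun a b => pvBefore b a = false)) :
    (PySem.List.insertBy pvBefore x ys).Pairwise (fun a b => pvBefore b a = false) := by
  induction ys with
  | nil => simp [PySem.List.insertBy]
  | cons y t ih =>
    rw [List.pairwise_cons] at h
    by_cases hb : pvBefore x y = true
    · show (if pvBefore x y = true then x :: y :: t else y :: PySem.List.insertBy pvBefore x t).Pairwise _
      rw [if_pos hb]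
      refine List.Pairwise.cons ?_ (List.Pairwise.cons h.1 h.2)
      intro z hz
      rcases hz with _ | hz
      · exact pvBefore_asymm hb
      · rename_i hz
        by_cases hzx : pvBefore z x = true
        · exact absurd (pvBefore_trans hzx hb) (by simp [h.1 z hz])
        · simpa using hzx
    · show (if pvBefore x y = true then x :: y :: t else y :: PySem.List.insertBy pvBefore x t).Pairwise _
      rw [if_neg hb]
      refine List.Pairwise.cons ?_ (ih h.2)
      intro z hz
      rw [PySem.List.insertBy_mem_iff] at hz
      rcases hz with rfl | hz
      · simpa using hb
      · exact h.1 z hz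

-- Source B's sort builds a pairwise non-inverted permutation of its input
theorem pvFoldl_insertBy (xs : List (String × String)) :
    ∀ acc : List (String × String), acc.Pairwise (fun a b => pvBefore b a = false) →
    (xs.foldl (fun acc x => PySem.List.insertBy pvBefore x acc) acc).Pairwise
      (fun a b => pvBefore b a = false) ∧
    (xs.foldl (fun acc x => PySem.List.insertBy pvBefore x acc) acc).Perm (acc ++ xs) := by
  induction xs with
  | nil => intro acc h; simpa using h
  | cons x t ih =>
    intro acc h
    have h1 := pvInsertBy_pairwise x acc h
    obtain ⟨hp, hperm⟩ := ih (PySem.List.insertBy pvBefore x acc) h1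
    refine ⟨hp, ?_⟩
    simp only [List.foldl_cons]
    refine hperm.trans ?_
    have := PySem.List.insertBy_perm pvBefore x acc
    refine (this.append_right t).trans ?_
    simpa using (List.perm_middle (a := x) (l₁ := acc) (l₂ := t)).symm

-- a strictly pvBefore-increasing permutation is THE sorted order
theorem pvSorted_unique : ∀ (ys zs : List (String × String)), zs.Perm ys →
    ys.Pairwise (fun a b => pvBefore a b = true) →
    zs.Pairwise (fun a b => pvBefore b a = false) → zs = ys := by
  intro ys
  induction ys with
  | nil => intro zs hp _ _; simpa using hp.eq_nil
  | cons y t ih =>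
    intro zs hp hys hzs
    cases zs with
    | nil => exact absurd hp.symm.eq_nil (by simp)
    | cons z zt =>
      rw [List.pairwise_cons] at hys hzs
      have hzy : z = y := by
        by_contra hne
        have hymem : y ∈ z :: zt := hp.mem_iff.mpr (by simp)
        have hzmem : z ∈ y :: t := hp.mem_iff.mp (by simp)
        rcases List.mem_cons.mp hymem with rfl | hy'
        · exact hne rfl
        rcases List.mem_cons.mp hzmem with rfl | hz'
        · exact hne rfl
        have h1 : pvBefore y z = false := hzs.1 y hy'
        have h2 : pvBefore y z = true := hys.1 z hz'
        simp [h1] at h2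
      subst hzy
      have hperm' : zt.Perm t := (List.perm_cons z).mp hp
      rw [ih zt hperm' hys.2 hzs.2]

-- the canonical decomposition both programs compute
def pvParents (tp : List (String × String)) : List String :=
  PySem.List.sorted (PySem.Set.ofList (tp.map (fun x => x.2))) (fun x => x) false

def pvChildren (tp : List (String × String)) (p : String) : List String :=
  PySem.List.sorted ((tp.filter (fun x => x.2 == p)).map (fun x => x.1)) (fun x => x) false

def pvCanon (tp : List (String × String)) : List (String × String) :=
  (pvParents tp).flatMap (fun p => (pvChildren tp p).map (fun c => (c, p)))

theorem pvFlatMap_congr {α β : Type} (P : List α) (f g : α → List β)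
    (h : ∀ p ∈ P, f p = g p) : P.flatMap f = P.flatMap g := by
  induction P with
  | nil => rfl
  | cons p P' ih =>
    simp only [List.flatMap_cons]
    rw [h p (by simp), ih (fun q hq => h q (by simp [hq]))]

theorem pvFlatMap_perm {α β : Type} (P : List α) (f g : α → List β)
    (h : ∀ p ∈ P, (f p).Perm (g p)) : (P.flatMap f).Perm (P.flatMap g) := by
  induction P with
  | nil => simp
  | cons p P' ih =>
    simp only [List.flatMap_cons]
    exact (h p (by simp)).append (ih (fun q hq => h q (by simp [hq])))

-- splitting a list by the (distinct) values of .2 is a permutation of it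
theorem pvFlatMap_filter_perm : ∀ (P : List String) (tp : List (String × String)), P.Nodup →
    (∀ x ∈ tp, x.2 ∈ P) →
    (P.flatMap (fun p => tp.filter (fun x => x.2 == p))).Perm tp := by
  intro P
  induction P with
  | nil =>
    intro tp _ h
    have : tp = [] := List.eq_nil_iff_forall_not_mem.mpr (fun x hx => by simpa using h x hx)
    simp [this]
  | cons p P' ih =>
    intro tp hnd h
    rw [List.nodup_cons] at hnd
    simp only [List.flatMap_cons]
    have hcongr : ∀ q ∈ P', tp.filter (fun x => x.2 == q)
        = (tp.filter (fun x => !(x.2 == p))).filter (fun x => x.2 == q) := by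
      intro q hq
      rw [List.filter_filter]
      apply List.filter_congr
      intro x _
      cases hxq : (x.2 == q)
      · simp
      · have : x.2 = q := by simpa using hxq
        have hne : (x.2 == p) = false := by
          simp only [beq_eq_false_iff_ne, ne_eq, this]
          intro hqp; exact hnd.1 (hqp ▸ hq)
        simp [hne]
    rw [pvFlatMap_congr P' _ _ hcongr]
    have hih := ih (tp.filter (fun x => !(x.2 == p))) hnd.2 (by
      intro x hx
      rw [List.mem_filter] at hx
      have := h x hx.1
      rcases List.mem_cons.mp this with h' | h'
      · exact absurd (by simpa using h') (by simpa using hx.2)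
      · exact h')
    exact (List.Perm.append_left _ hih).trans (List.filter_append_perm _ tp)

theorem pvParents_nodup (tp : List (String × String)) : (pvParents tp).Nodup :=
  ((PySem.List.sorted_perm _ _ _).nodup_iff).mpr (PySem.Set.nodup_ofList _)

theorem pvMem_parents {tp : List (String × String)} {x : String × String} (hx : x ∈ tp) :
    x.2 ∈ pvParents tp := by
  unfold pvParents
  rw [PySem.List.mem_sorted, PySem.Set.mem_ofList]
  exact List.mem_map_of_mem hx

theorem pvGroup_eq_filter (tp : List (String × String)) (p : String) :
    ((pvChildren tp p).map (fun c => (c, p))).Perm (tp.filter (fun x => x.2 == p)) := by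
  have h1 : ((pvChildren tp p).map (fun c => (c, p))).Perm
      (((tp.filter (fun x => x.2 == p)).map (fun x => x.1)).map (fun c => (c, p))) :=
    (PySem.List.sorted_perm _ _ _).map _
  refine h1.trans ?_
  rw [List.map_map]
  have : ∀ x ∈ tp.filter (fun y => y.2 == p), ((fun c => (c, p)) ∘ fun x => x.1) x = x := by
    intro x hx
    rw [List.mem_filter] at hx
    have : x.2 = p := by simpa using hx.2
    simp [← this]
  rw [List.map_congr_left this]
  simp

theorem pvCanon_perm (tp : List (String × String)) : (pvCanon tp).Perm tp := by
  unfold pvCanon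
  refine (pvFlatMap_perm _ _ _ (fun p _ => pvGroup_eq_filter tp p)).trans ?_
  exact pvFlatMap_filter_perm (pvParents tp) tp (pvParents_nodup tp) (fun x hx => pvMem_parents hx)

theorem pvCanon_pairwise (tp : List (String × String))
    (hnd : (tp.map (fun x => x.1)).Nodup) :
    (pvCanon tp).Pairwise (fun a b => pvBefore a b = true) := by
  unfold pvCanon
  have hP : (pvParents tp).Pairwise (fun a b => a < b) :=
    PySem.List.sorted_ofList_pairwise_lt _
  have main : ∀ (P : List String), P.Pairwise (fun a b => a < b) →
      ((P.flatMap (fun p => (pvChildren tp p).map (fun c => (c, p))))).Pairwise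
        (fun a b => pvBefore a b = true) := by
    intro P
    induction P with
    | nil => intro _; simp
    | cons p P' ih =>
      intro hp
      rw [List.pairwise_cons] at hp
      simp only [List.flatMap_cons]
      rw [List.pairwise_append]
      refine ⟨?_, ih hp.2, ?_⟩
      · rw [List.pairwise_map]
        have hle : (pvChildren tp p).Pairwise (fun a b => a ≤ b) := by
          have := PySem.List.sorted_pairwise ((tp.filter (fun x => x.2 == p)).map (fun x => x.1)) (fun x => x)
          simpa [pvChildren] using this
        have hndc : (pvChildren tp p).Nodup := by
          have hsub : ((tp.filter (fun x => x.2 == p)).map (fun x => x.1)).Sublist (tp.map (fun x => x.1)) :=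
            (List.filter_sublist (l := tp)).map _
          exact ((PySem.List.sorted_perm _ _ _).nodup_iff).mpr (hnd.sublist hsub)
        have hlt : (pvChildren tp p).Pairwise (fun a b => a < b) := by
          have hne : (pvChildren tp p).Pairwise (fun a b => a ≠ b) := hndc
          exact (hle.and hne).imp (fun h => lt_of_le_of_ne h.1 h.2)
        refine hlt.imp ?_
        intro a b hab
        rw [pvBefore_iff]; exact Or.inr ⟨rfl, hab⟩
      · intro a ha b hb
        rw [List.mem_map] at ha
        obtain ⟨c, _, rfl⟩ := ha
        rw [List.mem_flatMap] at hb
        obtain ⟨q, hq, hbq⟩ := hb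
        rw [List.mem_map] at hbq
        obtain ⟨c', _, rfl⟩ := hbq
        rw [pvBefore_iff]
        exact Or.inl (hp.1 q hq)
  exact main _ hP

-- Source B's global sort produces exactly the canonical decomposition
theorem pvSorted2_eq (tp : List (String × String)) (hnd : (tp.map (fun x => x.1)).Nodup) :
    PySem.List.sorted2 tp (fun kv => kv.2) (fun kv => kv.1) false = pvCanon tp := by
  have hrfl : PySem.List.sorted2 tp (fun kv => kv.2) (fun kv => kv.1) false
      = tp.foldl (fun acc x => PySem.List.insertBy pvBefore x acc) [] := rfl
  rw [hrfl]
  obtain ⟨hpw, hperm⟩ := pvFoldl_insertBy tp [] (by simp)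
  refine pvSorted_unique (pvCanon tp) _ ?_ (pvCanon_pairwise tp hnd) hpw
  exact (hperm.trans (by simp)).trans (pvCanon_perm tp).symm

theorem pvTakeWhile_append {α : Type} (q : α → Bool) (l₁ l₂ : List α)
    (h : ∀ x ∈ l₁, q x = true) :
    (l₁ ++ l₂).takeWhile q = l₁ ++ l₂.takeWhile q ∧ (l₁ ++ l₂).dropWhile q = l₂.dropWhile q := by
  induction l₁ with
  | nil => simp
  | cons a t ih =>
    have ha : q a = true := h a (by simp)
    have := ih (fun x hx => h x (by simp [hx]))
    simp [ha, this.1, this.2]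

theorem pvTakeWhile_none {α : Type} (q : α → Bool) (l : List α)
    (h : ∀ x ∈ l, q x = false) : l.takeWhile q = [] ∧ l.dropWhile q = l := by
  cases l with
  | nil => simp
  | cons a t => simp [h a (by simp)]

-- the linear scan cuts a parent-grouped concatenation back into its groups
theorem pvGroups_flatMap : ∀ (P : List String) (f : String → List String),
    P.Pairwise (fun a b => a < b) → (∀ p ∈ P, f p ≠ []) →
    pvGroups (P.flatMap (fun p => (f p).map (fun c => (c, p)))) = P.map (fun p => (p, f p)) := by
  intro P
  induction P with
  | nil => intro f _ _; simp [pvGroups]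
  | cons p P' ih =>
    intro f hpw hne
    rw [List.pairwise_cons] at hpw
    simp only [List.flatMap_cons]
    obtain ⟨c, cs, hcs⟩ := List.exists_cons_of_ne_nil (hne p (by simp))
    rw [hcs]
    simp only [List.map_cons, List.cons_append]
    rw [pvGroups]
    have hall : ∀ x ∈ cs.map (fun c => (c, p)), (fun x => x.2 == p) x = true := by
      intro x hx; rw [List.mem_map] at hx; obtain ⟨c', _, rfl⟩ := hx; simp
    have hrest : ∀ x ∈ P'.flatMap (fun p => (f p).map (fun c => (c, p))),
        (fun x => x.2 == p) x = false := by
      intro x hx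
      rw [List.mem_flatMap] at hx
      obtain ⟨q, hq, hxq⟩ := hx
      rw [List.mem_map] at hxq
      obtain ⟨c', _, rfl⟩ := hxq
      have : p < q := hpw.1 q hq
      simp only [beq_eq_false_iff_ne, ne_eq]
      intro h'; rw [h'] at this; exact lt_irrefl _ this
    have h1 := pvTakeWhile_append (fun x => x.2 == p) (cs.map (fun c => (c, p)))
      (P'.flatMap (fun p => (f p).map (fun c => (c, p)))) hall
    have h2 := pvTakeWhile_none (fun x => x.2 == p)
      (P'.flatMap (fun p => (f p).map (fun c => (c, p)))) hrest
    rw [h1.1, h1.2, h2.1, h2.2]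
    rw [ih f hpw.2 (fun q hq => hne q (by simp [hq]))]
    simp [hcs, List.map_map, Function.comp_def]

theorem pvChildren_ne_nil {tp : List (String × String)} {p : String}
    (hp : p ∈ pvParents tp) : pvChildren tp p ≠ [] := by
  unfold pvParents at hp
  rw [PySem.List.mem_sorted, PySem.Set.mem_ofList, List.mem_map] at hp
  obtain ⟨x, hx, rfl⟩ := hp
  unfold pvChildren
  rw [Ne, PySem.List.sorted_eq_nil_iff]
  intro h
  have : x ∈ tp.filter (fun y => y.2 == x.2) := List.mem_filter.mpr ⟨hx, by simp⟩
  rw [List.map_eq_nil_iff] at h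
  rw [h] at this
  simp at this

theorem pvGroups_canon (tp : List (String × String)) :
    pvGroups (pvCanon tp) = (pvParents tp).map (fun p => (p, pvChildren tp p)) := by
  exact pvGroups_flatMap (pvParents tp) (pvChildren tp)
    (PySem.List.sorted_ofList_pairwise_lt _) (fun p hp => pvChildren_ne_nil hp)

-- A's dict computations
theorem pvHierarchy_keys (tp : List (String × String)) :
    (tp.foldl (fun d cp => d.modify cp.2 [] (fun l => l ++ [cp.1])) PySem.Dict.empty).keys
      = PySem.Set.ofList (tp.map (fun x => x.2)) := by
  have := PySem.Dict.keys_foldl_modify_key tp (fun cp => cp.2) ([] : List String)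
    (fun _ cp l => l ++ [cp.1]) PySem.Dict.empty
  simpa using this

theorem pvHierarchy_getD (tp : List (String × String)) (p : String) :
    (tp.foldl (fun d cp => d.modify cp.2 [] (fun l => l ++ [cp.1])) PySem.Dict.empty).getD p []
      = (tp.filter (fun x => x.2 == p)).map (fun x => x.1) := by
  have hfold : tp.foldl (fun d cp => d.modify cp.2 [] (fun l => l ++ [cp.1])) PySem.Dict.empty
      = (tp.map Prod.swap).foldl (fun d q => d.modify q.1 [] (fun l => l ++ [q.2])) PySem.Dict.empty := by
    rw [List.foldl_map]
    rfl
  rw [hfold, PySem.Dict.getD_foldl_modify_append]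
  rw [List.filter_map, List.map_map]
  simp [PySem.Dict.getD_empty, Function.comp_def, Prod.swap]

-- ===== VERDICT (by name: the statement is the Claim_ definition above) =====
theorem get_type_hierarchy_spec : Claim_equal_get_type_hierarchy := by
  intro tp _ hpre
  unfold Spec_get_type_hierarchy get_type_hierarchy get_type_hierarchy_alt
  have hA : (PySem.List.sorted
        (tp.foldl (fun d cp => d.modify cp.2 [] (fun l => l ++ [cp.1])) PySem.Dict.empty).keys
        (fun x => x) false).foldl (fun acc parent =>
        if parent == "object" then
          acc ++ ["    " ++ PySem.Str.join " " (PySem.List.sorted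
            ((tp.foldl (fun d cp => d.modify cp.2 [] (fun l => l ++ [cp.1])) PySem.Dict.empty).getD parent [])
            (fun x => x) false) ++ " - " ++ parent]
        else
          acc ++ ["    " ++ PySem.Str.join " " (PySem.List.sorted
            ((tp.foldl (fun d cp => d.modify cp.2 [] (fun l => l ++ [cp.1])) PySem.Dict.empty).getD parent [])
            (fun x => x) false) ++ " - " ++ parent]) []
      = (pvParents tp).map (fun p => "    " ++ PySem.Str.join " " (pvChildren tp p) ++ " - " ++ p) := by
    simp only [ite_self, pvHierarchy_getD, pvHierarchy_keys]
    rw [PySem.List.foldl_append_singleton_eq_map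
      (fun p => "    " ++ PySem.Str.join " " (PySem.List.sorted
        ((tp.filter (fun x => x.2 == p)).map (fun x => x.1)) (fun x => x) false) ++ " - " ++ p)]
    rfl
  have hB : (pvGroups (PySem.List.sorted2 tp (fun kv => kv.2) (fun kv => kv.1) false)).map
        (fun g => "    " ++ PySem.Str.join " " g.2 ++ " - " ++ g.1)
      = (pvParents tp).map (fun p => "    " ++ PySem.Str.join " " (pvChildren tp p) ++ " - " ++ p) := by
    rw [pvSorted2_eq tp hpre.2, pvGroups_canon, List.map_map]
    rfl
  simp only [hA, hB]
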